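-- pv_equiv track=rewrite | github.com/kapsitis/algorithms-and-puzzles | sagatavosanas2018/uzdevums1.py | count_operations_onepass
-- ===== SOURCE A (Python) =====
-- import copy
--
-- def count_operations_onepass(N,K,SEQ1, SEQ2):
--     # Negribam sabojāt SEQ1 parametru
--     SEQ3 = copy.deepcopy(SEQ1)
--
--     # total_rolling - kas būtu pieskaitīts SEQ1[i] elementam ar lēno algoritmu
--     total_rolling = 0
--     total = 0
--     # diff_list atceras, kas pieskaitīts agrākajās pozīcijās
--     diff_list = []
--     for i in range(0, N):
--         # pieskaita visu, kas uzkrāts agrākajās pozīcijās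
--         SEQ3[i] = (SEQ3[i] + total_rolling) % 10
--         diff = 0
--         if i <= N-K:
--             # cik papildu gājieni jāizdara, lai izlīdzinātu šajā pozīcijā
--             diff = (SEQ2[i] - SEQ3[i]) % 10
--             if K > 1:
--                 total_rolling += diff
--             total += diff
--             SEQ3[i] = (SEQ3[i] + diff) % 10
--         # Vecu "diff" vērtību atskaita, ja logs jau aizbraucis tai garām
--         if i >= K-1 and K > 1:
--             total_rolling -= diff_list[i - K + 1]
--         diff_list.append(diff)
--     if SEQ3 == SEQ2:
--         return total
--     else:
--         return -1
-- ===== SOURCE B (Python) =====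
-- def count_operations_onepass(N, K, SEQ1, SEQ2):
--     # Naive simulation: apply each window operation directly (O(N*K)).
--     SEQ = list(SEQ1)
--     total = 0
--     for i in range(N - K + 1):
--         need = (SEQ2[i] - SEQ[i]) % 10
--         total += need
--         for j in range(i, i + K):
--             SEQ[j] = (SEQ[j] + need) % 10
--     return total if SEQ == SEQ2 else -1
-- ===== Notes on version B (the rewrite author's own statement) =====
-- stated objective: simpler
-- what changed: Replaced A's O(N) rolling-sum/diff-list bookkeeping by the naive simulation that, for each window position, computes the needed additions and re-applies them mod 10 to every element of the window with a nested loop (O(N*K)).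
-- intended difference: When 1 <= N < K (window larger than the nonempty sequence, so no operation is possible) A still reduces the first N entries mod 10 before the final comparison and can answer 0 for unequal sequences (or -1 for equal sequences containing entries outside 0..9), while B compares the untouched sequence directly and returns -1 (resp. 0), the intended 'already equal?' test. — e.g. on count_operations_onepass(1, 2, [12], [2]): A returns 0, B returns -1
-- outside the precondition, e.g. on count_operations_onepass(2, 0, [1, 2], [3, 4]): A returns 4, B raises IndexError; on count_operations_onepass(1, 0, [1, 2], [3, 4]): A returns -1, B returns -1
import Mathlib
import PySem

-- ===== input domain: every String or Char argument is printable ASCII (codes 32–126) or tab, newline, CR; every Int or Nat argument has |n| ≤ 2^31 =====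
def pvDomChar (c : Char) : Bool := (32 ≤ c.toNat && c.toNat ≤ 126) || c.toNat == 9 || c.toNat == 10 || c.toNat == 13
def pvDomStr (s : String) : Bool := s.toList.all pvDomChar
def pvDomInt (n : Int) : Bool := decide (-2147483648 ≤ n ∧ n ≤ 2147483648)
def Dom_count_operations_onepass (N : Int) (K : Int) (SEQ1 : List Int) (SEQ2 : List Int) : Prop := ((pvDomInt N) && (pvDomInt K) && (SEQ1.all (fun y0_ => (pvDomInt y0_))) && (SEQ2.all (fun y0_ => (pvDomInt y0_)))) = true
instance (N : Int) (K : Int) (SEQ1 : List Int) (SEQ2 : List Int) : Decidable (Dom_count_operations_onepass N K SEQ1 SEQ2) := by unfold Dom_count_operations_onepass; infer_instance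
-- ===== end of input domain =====

-- B replaces A's rolling-sum/diff-list bookkeeping by the naive O(N*K) simulation that re-applies each
-- window operation element by element (objective: simpler). Equivalence is about the RETURN value only
-- (neither Python mutates its arguments: A deep-copies, B copies).

-- ===== PORT A =====
-- one loop iteration of A (literal transliteration of the body of `for i in range(0, N)`)
def pvStepA (N : Int) (K : Int) (SEQ2 : List Int) (st : List Int × Int × Int × List Int) (i : Int) :
    List Int × Int × Int × List Int :=
  let S3 := st.1
  let tr := st.2.1
  let tot := st.2.2.1
  let dl := st.2.2.2
  -- SEQ3[i] = (SEQ3[i] + total_rolling) % 10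
  let S3 := PySem.List.pySetD S3 i (PySem.Int.mod (PySem.List.pyGetD S3 i 0 + tr) 10)
  -- diff = 0; if i <= N-K: diff = (SEQ2[i] - SEQ3[i]) % 10
  let diff : Int := if i ≤ N - K then PySem.Int.mod (PySem.List.pyGetD SEQ2 i 0 - PySem.List.pyGetD S3 i 0) 10 else 0
  -- if i <= N-K and K > 1: total_rolling += diff
  let tr := if i ≤ N - K ∧ K > 1 then tr + diff else tr
  -- if i <= N-K: total += diff
  let tot := if i ≤ N - K then tot + diff else tot
  -- if i <= N-K: SEQ3[i] = (SEQ3[i] + diff) % 10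
  let S3 := if i ≤ N - K then PySem.List.pySetD S3 i (PySem.Int.mod (PySem.List.pyGetD S3 i 0 + diff) 10) else S3
  -- if i >= K-1 and K > 1: total_rolling -= diff_list[i-K+1]
  let tr := if K - 1 ≤ i ∧ K > 1 then tr - PySem.List.pyGetD dl (i - K + 1) 0 else tr
  -- diff_list.append(diff)
  (S3, tr, tot, dl ++ [diff])

def count_operations_onepass (N : Int) (K : Int) (SEQ1 : List Int) (SEQ2 : List Int) : Int :=
  let fin := (PySem.List.pyRange 0 N 1).foldl (pvStepA N K SEQ2) (SEQ1, 0, 0, ([] : List Int))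
  if fin.1 = SEQ2 then fin.2.2.1 else -1

-- ===== PORT B =====
-- one loop iteration of B: need = (SEQ2[i]-SEQ[i]) % 10; apply it to the whole window; total += need
def pvStepB (_N : Int) (K : Int) (SEQ2 : List Int) (st : List Int × Int) (i : Int) : List Int × Int :=
  let need := PySem.Int.mod (PySem.List.pyGetD SEQ2 i 0 - PySem.List.pyGetD st.1 i 0) 10
  let S := (PySem.List.pyRange i (i + K) 1).foldl
      (fun S j => PySem.List.pySetD S j (PySem.Int.mod (PySem.List.pyGetD S j 0 + need) 10)) st.1
  (S, st.2 + need)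

def count_operations_onepass_alt (N : Int) (K : Int) (SEQ1 : List Int) (SEQ2 : List Int) : Int :=
  let fin := (PySem.List.pyRange 0 (N - K + 1) 1).foldl (pvStepB N K SEQ2) (SEQ1, 0)
  if fin.1 = SEQ2 then fin.2 else -1

-- ===== PRECONDITION & SPEC =====
-- Pre_ admits exactly the inputs with a positive window size K on which A raises no IndexError.
-- It additionally excludes K ≤ 0, outside the puzzle's domain of positive window sizes: there A's value
-- is an accident of its loop bounds, and B's outer loop runs past N and raises IndexError on some such
-- inputs (e.g. the cited one) while on the rest the two accidental -1/total values happen to coincide.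
def Pre_count_operations_onepass (N : Int) (K : Int) (SEQ1 : List Int) (SEQ2 : List Int) : Prop :=
  1 ≤ K ∧ N ≤ (SEQ1.length : Int) ∧ N - K < (SEQ2.length : Int)
instance (N : Int) (K : Int) (SEQ1 : List Int) (SEQ2 : List Int) : Decidable (Pre_count_operations_onepass N K SEQ1 SEQ2) := by unfold Pre_count_operations_onepass; infer_instance
def pvWitness_count_operations_onepass : Int × Int × List Int × List Int := (3, 2, [1, 2, 3], [4, 5, 6])

-- When the window is larger than the nonempty sequence (N < K) no operation is possible, yet A still
-- reduces the first N entries mod 10 before the final comparison, so it answers 0 for sequences that are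
-- not equal (or -1 for equal sequences with entries outside 0..9); B compares the untouched sequence
-- directly, the intended "already equal?" test.
def D_count_operations_onepass (N : Int) (K : Int) (SEQ1 : List Int) (SEQ2 : List Int) : Prop :=
  1 ≤ N ∧ N < K ∧
    ¬(((SEQ1.take N.toNat).map (fun x => PySem.Int.mod x 10) ++ SEQ1.drop N.toNat) = SEQ2 ↔ SEQ1 = SEQ2)
instance (N : Int) (K : Int) (SEQ1 : List Int) (SEQ2 : List Int) : Decidable (D_count_operations_onepass N K SEQ1 SEQ2) := by unfold D_count_operations_onepass; infer_instance

def Spec_count_operations_onepass (N : Int) (K : Int) (SEQ1 : List Int) (SEQ2 : List Int) (out : Int) : Prop := ¬ D_count_operations_onepass N K SEQ1 SEQ2 → out = count_operations_onepass_alt N K SEQ1 SEQ2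
instance (N : Int) (K : Int) (SEQ1 : List Int) (SEQ2 : List Int) (out : Int) : Decidable (Spec_count_operations_onepass N K SEQ1 SEQ2 out) := by unfold Spec_count_operations_onepass; infer_instance

def pvDiffWitness_count_operations_onepass : Int × Int × List Int × List Int := (1, 2, [12], [2])
def pvDiffWitnessOut_count_operations_onepass : Int × Int := (0, -1)

-- ===== CLAIM (what is proved, stated in full; the proofs are below) =====
def Claim_unchanged_count_operations_onepass : Prop := ∀ (N : Int) (K : Int) (SEQ1 : List Int) (SEQ2 : List Int), Dom_count_operations_onepass N K SEQ1 SEQ2 → Pre_count_operations_onepass N K SEQ1 SEQ2 → Spec_count_operations_onepass N K SEQ1 SEQ2 (count_operations_onepass N K SEQ1 SEQ2)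
def Claim_changed_count_operations_onepass : Prop := Dom_count_operations_onepass (pvDiffWitness_count_operations_onepass.1) (pvDiffWitness_count_operations_onepass.2.1) (pvDiffWitness_count_operations_onepass.2.2.1) (pvDiffWitness_count_operations_onepass.2.2.2) ∧ Pre_count_operations_onepass (pvDiffWitness_count_operations_onepass.1) (pvDiffWitness_count_operations_onepass.2.1) (pvDiffWitness_count_operations_onepass.2.2.1) (pvDiffWitness_count_operations_onepass.2.2.2) ∧ D_count_operations_onepass (pvDiffWitness_count_operations_onepass.1) (pvDiffWitness_count_operations_onepass.2.1) (pvDiffWitness_count_operations_onepass.2.2.1) (pvDiffWitness_count_operations_onepass.2.2.2) ∧ count_operations_onepass (pvDiffWitness_count_operations_onepass.1) (pvDiffWitness_count_operations_onepass.2.1) (pvDiffWitness_count_operations_onepass.2.2.1) (pvDiffWitness_count_operations_onepass.2.2.2) = pvDiffWitnessOut_count_operations_onepass.1 ∧ count_operations_onepass_alt (pvDiffWitness_count_operations_onepass.1) (pvDiffWitness_count_operations_onepass.2.1) (pvDiffWitness_count_operations_onepass.2.2.1) (pvDiffWitness_count_operations_onepass.2.2.2) = pvDiffWitnessOut_count_operations_onepass.2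 ∧ pvDiffWitnessOut_count_operations_onepass.1 ≠ pvDiffWitnessOut_count_operations_onepass.2
def Claim_exact_count_operations_onepass : Prop := ∀ (N : Int) (K : Int) (SEQ1 : List Int) (SEQ2 : List Int), Dom_count_operations_onepass N K SEQ1 SEQ2 → Pre_count_operations_onepass N K SEQ1 SEQ2 → D_count_operations_onepass N K SEQ1 SEQ2 → count_operations_onepass N K SEQ1 SEQ2 ≠ count_operations_onepass_alt N K SEQ1 SEQ2

-- ===== LEMMAS AND PROOFS =====

-- the sequence of per-position "needs" (A's diff values): pvd i is what both programs add at window i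
def pvd (N : Int) (K : Int) (S1 : List Int) (S2 : List Int) : Nat → Int
  | i =>
    if (i : Int) ≤ N - K then
      PySem.Int.mod (S2.getD i 0 - PySem.Int.mod (S1.getD i 0 +
        ∑ j ∈ (Finset.Ico (i - (K.toNat - 1)) i).attach, pvd N K S1 S2 j.1) 10) 10
    else 0
  termination_by i => i
  decreasing_by exact (Finset.mem_Ico.mp j.2).2

-- A's rolling window sum just before iteration i
def pvW (N : Int) (K : Int) (S1 : List Int) (S2 : List Int) (i : Nat) : Int :=
  ∑ j ∈ Finset.Ico (i - (K.toNat - 1)) i, pvd N K S1 S2 j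

lemma pvd_eq (N K : Int) (S1 S2 : List Int) (i : Nat) :
    pvd N K S1 S2 i =
      if (i : Int) ≤ N - K then
        PySem.Int.mod (S2.getD i 0 - PySem.Int.mod (S1.getD i 0 + pvW N K S1 S2 i) 10) 10
      else 0 := by
  rw [pvd]; unfold pvW; rw [Finset.sum_attach]

-- final value of position p in A's SEQ3 once the loop has passed it
def pvFv (N : Int) (K : Int) (S1 : List Int) (S2 : List Int) (p : Nat) : Int :=
  if (p : Int) ≤ N - K then PySem.Int.mod (S2.getD p 0) 10
  else PySem.Int.mod (S1.getD p 0 + pvW N K S1 S2 p) 10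

-- A's SEQ3 after i iterations
def pvSA (N : Int) (K : Int) (S1 : List Int) (S2 : List Int) (i : Nat) : List Int :=
  (List.range S1.length).map (fun p => if p < i then pvFv N K S1 S2 p else S1.getD p 0)

-- sum of the needs already applied by B to position p after i outer iterations
def pvSig (N : Int) (K : Int) (S1 : List Int) (S2 : List Int) (i p : Nat) : Int :=
  ∑ j ∈ Finset.Ico (p - (K.toNat - 1)) (min i (p + 1)), pvd N K S1 S2 j

-- B's SEQ after i outer iterations
def pvSB (N : Int) (K : Int) (S1 : List Int) (S2 : List Int) (i : Nat) : List Int :=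
  (List.range S1.length).map (fun p =>
    if 1 ≤ i ∧ p < i + K.toNat - 1 then PySem.Int.mod (S1.getD p 0 + pvSig N K S1 S2 i p) 10
    else S1.getD p 0)

lemma pvmod10 (x : Int) : PySem.Int.mod x 10 = x % 10 :=
  PySem.Int.mod_eq_emod_of_pos (by norm_num)

lemma pv_set_map_range {α : Type} (L : Nat) (f : Nat → α) (p : Nat) (x : α) :
    ((List.range L).map f).set p x = (List.range L).map (fun q => if q = p then x else f q) := by
  apply List.ext_getElem
  · simp
  · intro q h1 h2
    simp only [List.getElem_set, List.getElem_map, List.getElem_range]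
    simp at h2
    by_cases h : q = p <;> simp [h]
    exact fun hpq => absurd hpq.symm h

lemma pv_map_range_getD_self (l : List Int) :
    (List.range l.length).map (fun p => l.getD p 0) = l := by
  apply List.ext_getElem
  · simp
  · intro q h1 h2
    simp [List.getD_eq_getElem?_getD, List.getElem?_eq_getElem h2]

lemma A_loop (N K : Int) (S1 S2 : List Int) (hK : 1 ≤ K) (hN : N.toNat ≤ S1.length) :
    ∀ i, i ≤ N.toNat →
      (List.range i).foldl (fun st (kk : Nat) => pvStepA N K S2 st (kk : Int)) (S1, 0, 0, ([] : List Int)) =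
        (pvSA N K S1 S2 i, pvW N K S1 S2 i, ∑ j ∈ Finset.range i, pvd N K S1 S2 j,
          (List.range i).map (pvd N K S1 S2)) := by
  intro i
  induction i with
  | zero =>
    intro _
    simp only [List.range_zero, List.foldl_nil, List.map_nil, Finset.range_zero, Finset.sum_empty]
    refine Prod.ext ?_ (Prod.ext ?_ rfl)
    · show S1 = pvSA N K S1 S2 0
      have : pvSA N K S1 S2 0 = S1 := by
        unfold pvSA
        calc (List.range S1.length).map (fun p => if p < 0 then pvFv N K S1 S2 p else S1.getD p 0)
            = (List.range S1.length).map (fun p => S1.getD p 0) :=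
              List.map_congr_left (fun q _ => by rw [if_neg (by omega)])
          _ = S1 := pv_map_range_getD_self S1
      exact this.symm
    · show (0 : Int) = pvW N K S1 S2 0
      unfold pvW
      rw [Finset.Ico_eq_empty (by omega), Finset.sum_empty]
  | succ i ih =>
    intro h
    rw [List.range_succ, List.foldl_append, ih (by omega), List.foldl_cons, List.foldl_nil]
    have hi1 : i < S1.length := by omega
    simp only [pvStepA]
    have he1 : PySem.List.pyGetD (pvSA N K S1 S2 i) (i : Int) 0 = S1.getD i 0 := by
      unfold pvSA
      rw [PySem.List.pyGetD_natCast, PySem.List.getD_map_range _ _ _ _ hi1, if_neg (by omega)]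
    rw [he1]
    have hS31 : PySem.List.pySetD (pvSA N K S1 S2 i) (i : Int)
        (PySem.Int.mod (S1.getD i 0 + pvW N K S1 S2 i) 10) =
        (List.range S1.length).map (fun q =>
          if q = i then PySem.Int.mod (S1.getD i 0 + pvW N K S1 S2 i) 10
          else if q < i then pvFv N K S1 S2 q else S1.getD q 0) := by
      unfold pvSA
      rw [PySem.List.pySetD_natCast, pv_set_map_range]
    rw [hS31]
    have he2 : PySem.List.pyGetD ((List.range S1.length).map (fun q =>
          if q = i then PySem.Int.mod (S1.getD i 0 + pvW N K S1 S2 i) 10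
          else if q < i then pvFv N K S1 S2 q else S1.getD q 0)) (i : Int) 0 =
        PySem.Int.mod (S1.getD i 0 + pvW N K S1 S2 i) 10 := by
      rw [PySem.List.pyGetD_natCast, PySem.List.getD_map_range _ _ _ _ hi1, if_pos rfl]
    rw [he2]
    have hS2g : PySem.List.pyGetD S2 (i : Int) 0 = S2.getD i 0 := by simp
    rw [hS2g]
    have hdiff : (if (i : Int) ≤ N - K then
        PySem.Int.mod (S2.getD i 0 - PySem.Int.mod (S1.getD i 0 + pvW N K S1 S2 i) 10) 10
        else 0) = pvd N K S1 S2 i := (pvd_eq N K S1 S2 i).symm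
    rw [hdiff]
    refine Prod.ext ?_ (Prod.ext ?_ (Prod.ext ?_ ?_))
    · -- SEQ3 component
      show (if (i : Int) ≤ N - K then _ else _) = pvSA N K S1 S2 (i + 1)
      by_cases hc : (i : Int) ≤ N - K
      · rw [if_pos hc, PySem.List.pySetD_natCast, pv_set_map_range]
        unfold pvSA
        apply List.map_congr_left
        intro q hq
        rw [List.mem_range] at hq
        by_cases hqi : q = i
        · subst hqi
          rw [if_pos rfl, if_pos (by omega)]
          unfold pvFv
          rw [if_pos hc, pvd_eq, if_pos hc]
          simp only [pvmod10]
          omega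
        · rw [if_neg hqi, if_neg hqi]
          by_cases hlt : q < i
          · rw [if_pos hlt, if_pos (by omega)]
          · rw [if_neg hlt, if_neg (by omega)]
      · rw [if_neg hc]
        unfold pvSA
        apply List.map_congr_left
        intro q hq
        rw [List.mem_range] at hq
        by_cases hqi : q = i
        · subst hqi
          rw [if_pos rfl, if_pos (by omega)]
          unfold pvFv
          rw [if_neg hc]
        · rw [if_neg hqi]
          by_cases hlt : q < i
          · rw [if_pos hlt, if_pos (by omega)]
          · rw [if_neg hlt, if_neg (by omega)]
    · -- total_rolling component
      show (if K - 1 ≤ (i : Int) ∧ K > 1 then _ else _) = pvW N K S1 S2 (i + 1)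
      by_cases hK1 : (1 : Int) < K
      · have hk2 : 2 ≤ K.toNat := by omega
        have htr1 : (if (i : Int) ≤ N - K ∧ K > 1 then pvW N K S1 S2 i + pvd N K S1 S2 i
            else pvW N K S1 S2 i) = pvW N K S1 S2 i + pvd N K S1 S2 i := by
          by_cases hc : (i : Int) ≤ N - K
          · rw [if_pos ⟨hc, hK1⟩]
          · rw [if_neg (by tauto), pvd_eq, if_neg hc, add_zero]
        rw [htr1]
        by_cases hio : K - 1 ≤ (i : Int)
        · have hik : K.toNat - 1 ≤ i := by omega
          have hlook : PySem.List.pyGetD ((List.range i).map (pvd N K S1 S2))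
              ((i : Int) - K + 1) 0 = pvd N K S1 S2 (i - (K.toNat - 1)) := by
            have hcast : (i : Int) - K + 1 = ((i - (K.toNat - 1) : Nat) : Int) := by omega
            rw [hcast, PySem.List.pyGetD_natCast,
              PySem.List.getD_map_range _ _ _ _ (by omega)]
          rw [if_pos ⟨hio, hK1⟩, hlook]
          unfold pvW
          have hA := Finset.sum_Ico_succ_top (by omega : i - (K.toNat - 1) ≤ i) (pvd N K S1 S2)
          have hB := Finset.sum_eq_sum_Ico_succ_bot
            (by omega : i - (K.toNat - 1) < i + 1) (pvd N K S1 S2)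
          have h1 : i - (K.toNat - 1) + 1 = i + 1 - (K.toNat - 1) := by omega
          rw [h1] at hB
          linarith [hA, hB]
        · rw [if_neg (by tauto)]
          unfold pvW
          have h1 : i - (K.toNat - 1) = 0 := by omega
          have h2 : i + 1 - (K.toNat - 1) = 0 := by omega
          rw [h1, h2, Finset.sum_Ico_succ_top (by omega : 0 ≤ i)]
      · rw [if_neg (by tauto), if_neg (by tauto)]
        unfold pvW
        have hk1 : K.toNat - 1 = 0 := by omega
        rw [hk1]
        have h1 : i - 0 = i := by omega
        have h2 : i + 1 - 0 = i + 1 := by omega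
        rw [h1, h2, Finset.Ico_eq_empty (by omega), Finset.Ico_eq_empty (by omega)]
    · -- total component
      show (if (i : Int) ≤ N - K then _ else _) = ∑ j ∈ Finset.range (i + 1), pvd N K S1 S2 j
      rw [Finset.sum_range_succ]
      by_cases hc : (i : Int) ≤ N - K
      · rw [if_pos hc]
      · rw [if_neg hc, pvd_eq, if_neg hc, add_zero]
    · -- diff_list component
      simp

lemma B_inner (w : Int) (L1 : Nat) (g : Nat → Int) (i : Nat) :
    ∀ c, i + c ≤ L1 →
      (List.range c).foldl
        (fun S (t : Nat) => PySem.List.pySetD S ((i : Int) + (t : Int))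
          (PySem.Int.mod (PySem.List.pyGetD S ((i : Int) + (t : Int)) 0 + w) 10))
        ((List.range L1).map g) =
      (List.range L1).map (fun q => if i ≤ q ∧ q < i + c then PySem.Int.mod (g q + w) 10 else g q) := by
  intro c
  induction c with
  | zero =>
    intro _
    simp only [List.range_zero, List.foldl_nil]
    apply List.map_congr_left
    intro q _
    rw [if_neg (by omega)]
  | succ c ih =>
    intro hc
    rw [List.range_succ, List.foldl_append, ih (by omega), List.foldl_cons, List.foldl_nil]
    have hcast : (i : Int) + (c : Int) = ((i + c : Nat) : Int) := by push_cast; ring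
    rw [hcast, PySem.List.pySetD_natCast, PySem.List.pyGetD_natCast,
      PySem.List.getD_map_range _ _ _ _ (by omega), pv_set_map_range]
    apply List.map_congr_left
    intro q hq
    rw [List.mem_range] at hq
    by_cases h : q = i + c
    · subst h
      rw [if_pos rfl, if_neg (by omega), if_pos (by omega)]
    · rw [if_neg h]
      by_cases h2 : i ≤ q ∧ q < i + c
      · rw [if_pos h2, if_pos (by omega)]
      · rw [if_neg h2, if_neg (by omega)]

lemma B_loop (N K : Int) (S1 S2 : List Int) (hK : 1 ≤ K) (hKN : K ≤ N) (hN : N.toNat ≤ S1.length) :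
    ∀ i, i ≤ (N - K + 1).toNat →
      (List.range i).foldl (fun st (kk : Nat) => pvStepB N K S2 st (kk : Int)) (S1, 0) =
        (pvSB N K S1 S2 i, ∑ j ∈ Finset.range i, pvd N K S1 S2 j) := by
  have hmn : (N - K + 1).toNat + K.toNat - 1 = N.toNat := by omega
  intro i
  induction i with
  | zero =>
    intro _
    simp only [List.range_zero, List.foldl_nil, Finset.range_zero, Finset.sum_empty]
    refine Prod.ext ?_ rfl
    show S1 = pvSB N K S1 S2 0
    have : pvSB N K S1 S2 0 = S1 := by
      unfold pvSB
      calc (List.range S1.length).map (fun p =>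
              if 1 ≤ 0 ∧ p < 0 + K.toNat - 1 then
                PySem.Int.mod (S1.getD p 0 + pvSig N K S1 S2 0 p) 10
              else S1.getD p 0)
          = (List.range S1.length).map (fun p => S1.getD p 0) :=
            List.map_congr_left (fun q _ => by rw [if_neg (by omega)])
        _ = S1 := pv_map_range_getD_self S1
    exact this.symm
  | succ i ih =>
    intro h
    rw [List.range_succ, List.foldl_append, ih (by omega), List.foldl_cons, List.foldl_nil]
    have hik : i + K.toNat ≤ S1.length := by omega
    have hc : (i : Int) ≤ N - K := by omega
    simp only [pvStepB]
    have hneed : PySem.Int.mod (PySem.List.pyGetD S2 (i : Int) 0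
        - PySem.List.pyGetD (pvSB N K S1 S2 i) (i : Int) 0) 10 = pvd N K S1 S2 i := by
      have hg : PySem.List.pyGetD (pvSB N K S1 S2 i) (i : Int) 0 =
          (if 1 ≤ i ∧ i < i + K.toNat - 1 then
            PySem.Int.mod (S1.getD i 0 + pvSig N K S1 S2 i i) 10 else S1.getD i 0) := by
        unfold pvSB
        rw [PySem.List.pyGetD_natCast, PySem.List.getD_map_range _ _ _ _ (by omega)]
      rw [hg, PySem.List.pyGetD_natCast]
      by_cases htch : 1 ≤ i ∧ i < i + K.toNat - 1
      · rw [if_pos htch]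
        have hσ : pvSig N K S1 S2 i i = pvW N K S1 S2 i := by
          unfold pvSig pvW
          rw [min_eq_left (by omega)]
        rw [hσ, pvd_eq, if_pos hc]
      · rw [if_neg htch]
        have hW0 : pvW N K S1 S2 i = 0 := by
          unfold pvW
          rw [Finset.Ico_eq_empty (by omega), Finset.sum_empty]
        rw [pvd_eq, if_pos hc, hW0]
        simp only [pvmod10]
        omega
    rw [hneed]
    have hrange : PySem.List.pyRange (i : Int) ((i : Int) + K) 1 =
        (List.range K.toNat).map (fun t : Nat => (i : Int) + (t : Int)) := by
      rw [PySem.List.pyRange_one]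
      have h2 : ((i : Int) + K - (i : Int)).toNat = K.toNat := by omega
      rw [h2]
    rw [hrange, List.foldl_map]
    unfold pvSB
    rw [B_inner (pvd N K S1 S2 i) S1.length _ i K.toNat hik]
    refine Prod.ext ?_ ?_
    · show _ = pvSB N K S1 S2 (i + 1)
      unfold pvSB
      apply List.map_congr_left
      intro q hq
      rw [List.mem_range] at hq
      by_cases hin : i ≤ q ∧ q < i + K.toNat
      · rw [if_pos hin]
        have hσ : pvSig N K S1 S2 (i + 1) q = pvSig N K S1 S2 i q + pvd N K S1 S2 i := by
          unfold pvSig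
          rw [min_eq_left (by omega), min_eq_left (by omega),
            Finset.sum_Ico_succ_top (by omega : q - (K.toNat - 1) ≤ i)]
        by_cases htch : 1 ≤ i ∧ q < i + K.toNat - 1
        · rw [if_pos htch, if_pos (by omega), hσ]
          simp only [pvmod10]
          omega
        · rw [if_neg htch, if_pos (by omega), hσ]
          have hσ0 : pvSig N K S1 S2 i q = 0 := by
            unfold pvSig
            rw [Finset.Ico_eq_empty (by omega), Finset.sum_empty]
          rw [hσ0]
          simp only [pvmod10]
          omega
      · rw [if_neg hin]
        by_cases hlt : q < i
        · rw [if_pos (by omega : 1 ≤ i ∧ q < i + K.toNat - 1), if_pos (by omega)]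
          have hσeq : pvSig N K S1 S2 (i + 1) q = pvSig N K S1 S2 i q := by
            unfold pvSig
            rw [min_eq_right (by omega), min_eq_right (by omega)]
          rw [hσeq]
        · rw [if_neg (by omega), if_neg (by omega)]
    · show (∑ j ∈ Finset.range i, pvd N K S1 S2 j) + pvd N K S1 S2 i
          = ∑ j ∈ Finset.range (i + 1), pvd N K S1 S2 j
      rw [Finset.sum_range_succ]

lemma pv_A_form (N K : Int) (S1 S2 : List Int) (hK : 1 ≤ K) (hN : N ≤ (S1.length : Int)) :
    count_operations_onepass N K S1 S2 =
      (if pvSA N K S1 S2 N.toNat = S2 then ∑ j ∈ Finset.range N.toNat, pvd N K S1 S2 j else -1) := by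
  simp only [count_operations_onepass]
  have hr : PySem.List.pyRange 0 N 1 = (List.range N.toNat).map (fun kk : Nat => (kk : Int)) := by
    rw [PySem.List.pyRange_one]
    have h2 : (N - 0).toNat = N.toNat := by omega
    rw [h2]
    simp
  rw [hr, List.foldl_map, A_loop N K S1 S2 hK (by omega) N.toNat le_rfl]

lemma pv_B_form_main (N K : Int) (S1 S2 : List Int) (hK : 1 ≤ K) (hKN : K ≤ N)
    (hN : N ≤ (S1.length : Int)) :
    count_operations_onepass_alt N K S1 S2 =
      (if pvSB N K S1 S2 (N - K + 1).toNat = S2 then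
        ∑ j ∈ Finset.range (N - K + 1).toNat, pvd N K S1 S2 j else -1) := by
  simp only [count_operations_onepass_alt]
  have hr : PySem.List.pyRange 0 (N - K + 1) 1 =
      (List.range (N - K + 1).toNat).map (fun kk : Nat => (kk : Int)) := by
    rw [PySem.List.pyRange_one]
    have h2 : (N - K + 1 - 0).toNat = (N - K + 1).toNat := by omega
    rw [h2]
    simp
  rw [hr, List.foldl_map, B_loop N K S1 S2 hK hKN (by omega) (N - K + 1).toNat le_rfl]

lemma pv_A_empty (N K : Int) (S1 S2 : List Int) (h : N ≤ 0) :
    count_operations_onepass N K S1 S2 = (if S1 = S2 then 0 else -1) := by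
  simp only [count_operations_onepass]
  rw [PySem.List.pyRange_one_eq_nil h, List.foldl_nil]

lemma pv_B_empty (N K : Int) (S1 S2 : List Int) (h : N - K + 1 ≤ 0) :
    count_operations_onepass_alt N K S1 S2 = (if S1 = S2 then 0 else -1) := by
  simp only [count_operations_onepass_alt]
  rw [PySem.List.pyRange_one_eq_nil h, List.foldl_nil]

lemma pv_pvd_zero_of_ge (N K : Int) (S1 S2 : List Int) (j : Nat) (h : ¬ ((j : Int) ≤ N - K)) :
    pvd N K S1 S2 j = 0 := by
  rw [pvd_eq, if_neg h]

lemma pv_main_sum (N K : Int) (S1 S2 : List Int) (hK : 1 ≤ K) (hKN : K ≤ N) :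
    ∑ j ∈ Finset.range N.toNat, pvd N K S1 S2 j =
      ∑ j ∈ Finset.range (N - K + 1).toNat, pvd N K S1 S2 j := by
  rw [Finset.range_eq_Ico,
    ← Finset.sum_Ico_consecutive _ (by omega : 0 ≤ (N - K + 1).toNat) (by omega : (N - K + 1).toNat ≤ N.toNat)]
  have hz : ∑ j ∈ Finset.Ico (N - K + 1).toNat N.toNat, pvd N K S1 S2 j = 0 := by
    apply Finset.sum_eq_zero
    intro j hj
    rw [Finset.mem_Ico] at hj
    exact pv_pvd_zero_of_ge N K S1 S2 j (by omega)
  rw [hz, add_zero]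

lemma pv_main_list (N K : Int) (S1 S2 : List Int) (hK : 1 ≤ K) (hKN : K ≤ N)
    (_hN : N ≤ (S1.length : Int)) :
    pvSA N K S1 S2 N.toNat = pvSB N K S1 S2 (N - K + 1).toNat := by
  unfold pvSA pvSB
  apply List.map_congr_left
  intro p hp
  rw [List.mem_range] at hp
  by_cases hpn : p < N.toNat
  · rw [if_pos hpn, if_pos (by omega)]
    unfold pvFv
    by_cases hpc : (p : Int) ≤ N - K
    · rw [if_pos hpc]
      have hσ : pvSig N K S1 S2 (N - K + 1).toNat p =
          pvW N K S1 S2 p + pvd N K S1 S2 p := by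
        unfold pvSig pvW
        rw [min_eq_right (by omega), Finset.sum_Ico_succ_top (by omega : p - (K.toNat - 1) ≤ p)]
      rw [hσ, pvd_eq, if_pos hpc]
      simp only [pvmod10]
      omega
    · rw [if_neg hpc]
      have hσ : pvSig N K S1 S2 (N - K + 1).toNat p = pvW N K S1 S2 p := by
        unfold pvSig pvW
        rw [min_eq_left (by omega)]
        rw [← Finset.sum_Ico_consecutive _
          (by omega : p - (K.toNat - 1) ≤ (N - K + 1).toNat) (by omega : (N - K + 1).toNat ≤ p)]
        have hz : ∑ j ∈ Finset.Ico (N - K + 1).toNat p, pvd N K S1 S2 j = 0 := by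
          apply Finset.sum_eq_zero
          intro j hj
          rw [Finset.mem_Ico] at hj
          exact pv_pvd_zero_of_ge N K S1 S2 j (by omega)
        rw [hz, add_zero]
      rw [hσ]
  · rw [if_neg hpn, if_neg (by omega)]

-- degenerate 1 ≤ N < K: A's final SEQ3 is SEQ1 with its first N entries reduced mod 10
lemma pv_deg_list (N K : Int) (S1 S2 : List Int) (hNK : N < K) (hN : N ≤ (S1.length : Int)) :
    pvSA N K S1 S2 N.toNat =
      (S1.take N.toNat).map (fun x => PySem.Int.mod x 10) ++ S1.drop N.toNat := by
  have hvz : ∀ p, pvW N K S1 S2 p = 0 := by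
    intro p
    apply Finset.sum_eq_zero
    intro j _
    exact pv_pvd_zero_of_ge N K S1 S2 j (by omega)
  apply List.ext_getElem
  · simp [pvSA]
    omega
  · intro p h1 h2
    have hp : p < S1.length := by simpa [pvSA] using h1
    unfold pvSA
    rw [List.getElem_map, List.getElem_range]
    by_cases hpn : p < N.toNat
    · rw [if_pos hpn]
      unfold pvFv
      rw [if_neg (by omega), hvz p, add_zero]
      rw [List.getElem_append_left (by simp; omega), List.getElem_map, List.getElem_take,
        List.getD_eq_getElem S1 0 hp]
    · rw [if_neg hpn]
      rw [List.getElem_append_right (by simp; omega), List.getElem_drop,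
        List.getD_eq_getElem S1 0 hp]
      congr 1
      simp
      omega

lemma pv_deg_sum (N K : Int) (S1 S2 : List Int) (hNK : N < K) :
    ∑ j ∈ Finset.range N.toNat, pvd N K S1 S2 j = 0 := by
  apply Finset.sum_eq_zero
  intro j _
  exact pv_pvd_zero_of_ge N K S1 S2 j (by omega)

theorem count_operations_onepass_spec : Claim_unchanged_count_operations_onepass := by
  intro N K S1 S2 _ hPre hnD
  obtain ⟨hK, hN, _⟩ := hPre
  by_cases hN0 : N ≤ 0
  · rw [pv_A_empty N K S1 S2 hN0, pv_B_empty N K S1 S2 (by omega)]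
  · by_cases hKN : K ≤ N
    · rw [pv_A_form N K S1 S2 hK hN, pv_B_form_main N K S1 S2 hK hKN hN,
        pv_main_list N K S1 S2 hK hKN hN, pv_main_sum N K S1 S2 hK hKN]
    · -- 1 ≤ N < K, and ¬D: the two final comparisons agree
      unfold D_count_operations_onepass at hnD
      push Not at hnD
      have hiff := hnD (by omega) (by omega)
      rw [pv_A_form N K S1 S2 hK hN, pv_B_empty N K S1 S2 (by omega),
        pv_deg_list N K S1 S2 (by omega) hN, pv_deg_sum N K S1 S2 (by omega)]
      by_cases hs : S1 = S2
      · rw [if_pos (hiff.mpr hs), if_pos hs]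
      · rw [if_neg (fun hc => hs (hiff.mp hc)), if_neg hs]

theorem count_operations_onepass_changed : Claim_changed_count_operations_onepass := by
  unfold Claim_changed_count_operations_onepass; decide

theorem count_operations_onepass_tight : Claim_exact_count_operations_onepass := by
  intro N K S1 S2 _ hPre hD
  obtain ⟨hK, hN, _⟩ := hPre
  obtain ⟨h1N, hNK, hxor⟩ := hD
  rw [pv_A_form N K S1 S2 hK hN, pv_B_empty N K S1 S2 (by omega),
    pv_deg_list N K S1 S2 hNK hN, pv_deg_sum N K S1 S2 hNK]
  by_cases hm : (S1.take N.toNat).map (fun x => PySem.Int.mod x 10) ++ S1.drop N.toNat = S2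
  · have hs : ¬ S1 = S2 := fun hs => hxor ⟨fun _ => hs, fun _ => hm⟩
    rw [if_pos hm, if_neg hs]
    omega
  · have hs : S1 = S2 := by
      by_contra hss
      exact hxor ⟨fun h => absurd h hm, fun h => absurd h hss⟩
    rw [if_neg hm, if_pos hs]
    omega
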